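-- pv_equiv track=rewrite | github.com/MassimilianoRoccamena/SideChannelAttack | src/main/utils/string.py | lower_identifier
-- ===== SOURCE A (Python) =====
-- def lower1(s):
--     '''
--     Beginning character become lowercase
--     '''
--     prefix = s[0].lower()
--     suffix = s[1:]
--     return f'{prefix}{suffix}'
--
-- def lower_identifier(s, sep='_'):
--     '''
--     Hungarian notiation like string become separated
--     '''
--     output = ''
--     first = True
--     start, end = 0, 0
--     for i in range(len(s)):
--         end = i
--         if s[i].isupper():
--             if start != end:
--                 suffix = lower1(s[start:end])
--                 if not first:
--                     suffix = f'{sep}{suffix}'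
--                 else:
--                     first = False
--                 output = f'{output}{suffix}'
--                 start = i
--     suffix = lower1(s[start:len(s)])
--     if not first:
--         suffix = f'{sep}{suffix}'
--     else:
--         first = False
--     output = f'{output}{suffix}'
--     return output
-- ===== SOURCE B (Python) =====
-- def lower_identifier(s, sep='_'):
--     # Index-table decomposition: segment-start positions, then slice + join.
--     starts = [0] + [i for i in range(1, len(s)) if s[i].isupper()]
--     bounds = starts + [len(s)]
--     parts = [s[bounds[k]:bounds[k + 1]] for k in range(len(starts))]
--     return sep.join(p[0].lower() + p[1:] for p in parts)
-- ===== Notes on version B (the rewrite author's own statement) =====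
-- stated objective: simpler
-- what changed: Replaces A's one-pass state machine (output accumulator, first flag, start/end cursors with conditional emission) by building an index table of segment starts, slicing consecutive bounds, and sep.join-ing the parts with their first character lowercased.
-- outside the precondition, e.g. on lower_identifier('', '_'): A raises IndexError, B raises IndexError
import Mathlib
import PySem

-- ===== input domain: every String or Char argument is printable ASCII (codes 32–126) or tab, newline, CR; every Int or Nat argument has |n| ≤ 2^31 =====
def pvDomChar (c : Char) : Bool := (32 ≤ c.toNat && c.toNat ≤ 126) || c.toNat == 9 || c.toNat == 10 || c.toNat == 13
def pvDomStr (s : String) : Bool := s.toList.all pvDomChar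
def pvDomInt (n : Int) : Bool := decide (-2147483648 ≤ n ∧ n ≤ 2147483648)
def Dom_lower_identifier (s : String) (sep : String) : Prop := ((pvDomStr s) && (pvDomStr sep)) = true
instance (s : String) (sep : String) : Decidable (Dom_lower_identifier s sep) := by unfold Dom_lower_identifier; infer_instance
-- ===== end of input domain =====

-- B replaces A's one-pass state machine (output accumulator, first flag, start/end cursors)
-- by an index table of segment starts, slicing consecutive bounds and joining: objective 'simpler'.
-- A raises IndexError on s = '' (lower1 indexes s[0]); B raises there too; Pre_ excludes it.


-- ===== PORT A =====
-- lower1: s[0].lower() + s[1:]; on '' Python raises IndexError — the [] case is unreachable under Pre_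
def pvLower1 (cs : List Char) : List Char :=
  match cs with
  | [] => []
  | c :: rest => PySem.Chars.lowerChar c :: rest

-- one iteration of A's for-loop; state = (output, first, start); end = i at each step
def pvStepA (cs sepL : List Char) (acc : List Char × Bool × Nat) (i : Nat) : List Char × Bool × Nat :=
  if PySem.Chars.isupper (PySem.List.pyGetD cs (i : Int) ' ') then
    if acc.2.2 ≠ i then
      let suffix := pvLower1 (PySem.List.slice cs (some (acc.2.2 : Int)) (some (i : Int)))
      let suffix := if !acc.2.1 then sepL ++ suffix else suffix
      (acc.1 ++ suffix, false, i)
    else acc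
  else acc

def lower_identifier (s : String) (sep : String) : String :=
  let cs := s.toList
  let st := (List.range cs.length).foldl (pvStepA cs sep.toList) ([], true, 0)
  let suffix := pvLower1 (PySem.List.slice cs (some (st.2.2 : Int)) (some (cs.length : Int)))
  let suffix := if !st.2.1 then sep.toList ++ suffix else suffix
  String.ofList (st.1 ++ suffix)

-- ===== PORT B =====
-- p[0].lower() + p[1:]; on '' Python raises IndexError — the [] case is unreachable under Pre_
def pvLow1B (p : List Char) : List Char :=
  match p with
  | [] => []
  | c :: rest => PySem.Chars.lowerChar c :: rest

def lower_identifier_alt (s : String) (sep : String) : String :=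
  let cs := s.toList
  let starts := 0 :: (List.range' 1 (cs.length - 1)).filter
      (fun (i : Nat) => PySem.Chars.isupper (PySem.List.pyGetD cs (i : Int) ' '))
  let bounds := starts ++ [cs.length]
  let parts := (List.range starts.length).map (fun (k : Nat) =>
      PySem.List.slice cs (some ((PySem.List.pyGetD bounds (k : Int) 0 : Nat) : Int))
                          (some ((PySem.List.pyGetD bounds ((k + 1 : Nat) : Int) 0 : Nat) : Int)))
  String.ofList (PySem.Chars.join sep.toList (parts.map pvLow1B))

-- ===== PRECONDITION & SPEC =====
-- Pre_ excludes only s = "", where Python A raises IndexError (and B raises the same).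
def Pre_lower_identifier (s : String) (_sep : String) : Prop := s ≠ ""
instance (s : String) (sep : String) : Decidable (Pre_lower_identifier s sep) := by unfold Pre_lower_identifier; infer_instance
def pvWitness_lower_identifier : String × String := ("camelCaseId", "_")

def Spec_lower_identifier (s : String) (sep : String) (out : String) : Prop := out = lower_identifier_alt s sep
instance (s : String) (sep : String) (out : String) : Decidable (Spec_lower_identifier s sep out) := by unfold Spec_lower_identifier; infer_instance

-- ===== CLAIM (what is proved, stated in full; the proofs are below) =====
def Claim_equal_lower_identifier : Prop := ∀ (s : String) (sep : String), Dom_lower_identifier s sep → Pre_lower_identifier s sep → Spec_lower_identifier s sep (lower_identifier s sep)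

-- ===== LEMMAS AND PROOFS =====

-- map f over adjacent pairs of (a :: bs)
def pvPairs {α : Type} (f : Nat → Nat → α) (a : Nat) : List Nat → List α
  | [] => []
  | b :: bs => f a b :: pvPairs f b bs

-- A's emission step with the guards stripped (what pvStepA does at an emitting index)
def pvG (cs sepL : List Char) (acc : List Char × Bool × Nat) (i : Nat) : List Char × Bool × Nat :=
  let suffix := pvLower1 (PySem.List.slice cs (some (acc.2.2 : Int)) (some (i : Int)))
  let suffix := if !acc.2.1 then sepL ++ suffix else suffix
  (acc.1 ++ suffix, false, i)

theorem pvLow1B_eq : pvLow1B = pvLower1 := by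
  funext p; cases p <;> rfl

theorem pvPairs_map {α β : Type} (h : α → β) (f : Nat → Nat → α) :
    ∀ (bs : List Nat) (a : Nat), (pvPairs f a bs).map h = pvPairs (fun x y => h (f x y)) a bs := by
  intro bs
  induction bs with
  | nil => intro a; rfl
  | cons b bs ih => intro a; simp [pvPairs, ih]

-- B's index-table comprehension is the adjacent-pairs map
theorem pvRange_map_pairs {α : Type} (f : Nat → Nat → α) :
    ∀ (us : List Nat) (b0 L : Nat),
      (List.range (us.length + 1)).map (fun k =>
        f (((b0 :: us) ++ [L]).getD k 0) (((b0 :: us) ++ [L]).getD (k + 1) 0))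
      = pvPairs f b0 (us ++ [L]) := by
  intro us
  induction us with
  | nil => intro b0 L; simp [pvPairs, List.range_succ]
  | cons u us ih =>
    intro b0 L
    have h := ih u L
    simp only [List.range_succ_eq_map, List.map_cons, List.map_map, Function.comp_def,
      List.cons_append, List.getD_cons_zero, List.getD_cons_succ, List.length_cons] at *
    simp only [pvPairs]
    rw [h]

-- fold of the guarded step over range' a m = fold of the emit step over the uppercase indices,
-- provided start < a (the guard 'start ≠ i' then always holds at uppercase indices)
theorem pvFold_filter (cs sepL : List Char) :
    ∀ (m a : Nat) (o : List Char) (fl : Bool) (st : Nat), st < a →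
      (List.range' a m).foldl (pvStepA cs sepL) (o, fl, st)
        = ((List.range' a m).filter
            (fun (i : Nat) => PySem.Chars.isupper (PySem.List.pyGetD cs (i : Int) ' '))).foldl
            (pvG cs sepL) (o, fl, st) := by
  intro m
  induction m with
  | zero => intro a o fl st _; rfl
  | succ m ih =>
    intro a o fl st h
    rw [List.range'_succ]
    by_cases hu : PySem.Chars.isupper (PySem.List.pyGetD cs (a : Int) ' ') = true
    · simp only [List.foldl_cons, List.filter_cons, hu, if_pos]
      have hne : st ≠ a := Nat.ne_of_lt h
      simp only [pvStepA, hu, if_pos, hne, ne_eq, not_false_eq_true]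
      exact ih (a + 1) _ _ a (Nat.lt_succ_self a)
    · simp only [List.foldl_cons, List.filter_cons, hu]
      simp only [pvStepA, hu, if_neg, Bool.false_eq_true, not_false_eq_true]
      exact ih (a + 1) o fl st (Nat.lt_succ_of_lt h)

-- finalizing A's emit-fold from a first=false state produces the joined tail segments
theorem pvFold_emit (cs sepL : List Char) (L : Nat) :
    ∀ (us : List Nat) (o : List Char) (st : Nat),
      (us.foldl (pvG cs sepL) (o, false, st)).1 ++
        (sepL ++ pvLower1 (PySem.List.slice cs
          (some ((us.foldl (pvG cs sepL) (o, false, st)).2.2 : Int)) (some (L : Int))))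
      = o ++ (sepL ++ PySem.Chars.join sepL
          (pvPairs (fun a b => pvLower1 (PySem.List.slice cs (some (a : Int)) (some (b : Int)))) st (us ++ [L]))) := by
  intro us
  induction us with
  | nil =>
    intro o st
    simp [pvPairs, PySem.Chars.join_singleton]
  | cons u us ih =>
    intro o st
    simp only [List.foldl_cons]
    have hstep : pvG cs sepL (o, false, st) u
        = (o ++ (sepL ++ pvLower1 (PySem.List.slice cs (some (st : Int)) (some (u : Int)))), false, u) := by
      simp [pvG]
    rw [hstep, ih]
    simp only [pvPairs, List.cons_append]
    obtain ⟨q, rest, hq⟩ : ∃ q rest, pvPairs (fun a b => pvLower1 (PySem.List.slice cs (some (a : Int)) (some (b : Int)))) u (us ++ [L]) = q :: rest := by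
      cases us <;> exact ⟨_, _, rfl⟩
    rw [hq, PySem.Chars.join_cons_cons]
    simp [List.append_assoc]

-- the foldl of the emit step keeps first = false
theorem pvG_first_false (cs sepL : List Char) :
    ∀ (us : List Nat) (o : List Char) (st : Nat),
      (us.foldl (pvG cs sepL) (o, false, st)).2.1 = false := by
  intro us
  induction us with
  | nil => intro o st; rfl
  | cons u us ih => intro o st; simpa [pvG] using ih _ _

theorem pvMain (cs sepL : List Char) (L : Nat) (us : List Nat) :
    (us.foldl (pvG cs sepL) ([], true, 0)).1 ++
      (if !(us.foldl (pvG cs sepL) ([], true, 0)).2.1 then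
        sepL ++ pvLower1 (PySem.List.slice cs
          (some ((us.foldl (pvG cs sepL) ([], true, 0)).2.2 : Int)) (some (L : Int)))
      else
        pvLower1 (PySem.List.slice cs
          (some ((us.foldl (pvG cs sepL) ([], true, 0)).2.2 : Int)) (some (L : Int))))
    = PySem.Chars.join sepL
        (pvPairs (fun a b => pvLower1 (PySem.List.slice cs (some (a : Int)) (some (b : Int)))) 0 (us ++ [L])) := by
  cases us with
  | nil => simp [pvPairs, PySem.Chars.join_singleton]
  | cons u us' =>
    simp only [List.foldl_cons]
    have hg : pvG cs sepL ([], true, 0) u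
        = (pvLower1 (PySem.List.slice cs (some (0 : Int)) (some (u : Int))), false, u) := by
      simp [pvG]
    rw [hg]
    have hf := pvG_first_false cs sepL us'
      (pvLower1 (PySem.List.slice cs (some (0 : Int)) (some (u : Int)))) u
    rw [if_pos (show (!(us'.foldl (pvG cs sepL)
      (pvLower1 (PySem.List.slice cs (some (0 : Int)) (some (u : Int))), false, u)).2.1) = true by rw [hf]; rfl)]
    rw [pvFold_emit cs sepL L us'
      (pvLower1 (PySem.List.slice cs (some (0 : Int)) (some (u : Int)))) u]
    simp only [pvPairs, List.cons_append]
    obtain ⟨q, rest, hq⟩ : ∃ q rest,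
        pvPairs (fun a b => pvLower1 (PySem.List.slice cs (some (a : Int)) (some (b : Int))))
          u (us' ++ [L]) = q :: rest := by
      cases us' <;> exact ⟨_, _, rfl⟩
    rw [hq, PySem.Chars.join_cons_cons]
    simp [List.append_assoc]

theorem lower_identifier_eq_alt (s sep : String) (h : s ≠ "") :
    lower_identifier s sep = lower_identifier_alt s sep := by
  have hcs : s.toList ≠ [] := fun hnil => h (by
    have := congrArg String.ofList hnil
    simpa using this)
  obtain ⟨m, hm⟩ : ∃ m, s.toList.length = m + 1 := by
    cases hl : s.toList.length with
    | zero => exact absurd (List.length_eq_zero_iff.mp hl) hcs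
    | succ m => exact ⟨m, rfl⟩
  simp only [lower_identifier, lower_identifier_alt]
  rw [hm]
  have hrange : List.range (m + 1) = 0 :: List.range' 1 m := by
    rw [List.range_eq_range']
    rfl
  rw [hrange]
  simp only [List.foldl_cons]
  have h0 : pvStepA s.toList sep.toList ([], true, 0) 0 = ([], true, 0) := by
    simp [pvStepA]
  rw [h0, pvFold_filter s.toList sep.toList m 1 [] true 0 (by omega)]
  simp only [Nat.add_sub_cancel, PySem.List.pyGetD_natCast, List.length_cons]
  rw [pvRange_map_pairs (fun a b => PySem.List.slice s.toList (some (a : Int)) (some (b : Int)))]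
  rw [pvPairs_map]
  simp only [pvLow1B_eq]
  exact congrArg String.ofList (pvMain s.toList sep.toList (m + 1) _)

-- ===== VERDICT (by name: the statement is the Claim_ definition above) =====
theorem lower_identifier_spec : Claim_equal_lower_identifier := by
  intro s sep _ hpre
  exact lower_identifier_eq_alt s sep hpre
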